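-- pv_equiv track=rewrite | github.com/abakedjoetato/Ekf1.8 | bot/parsers/unified_log_parser.py | get_mission_level
-- ===== SOURCE A (Python) =====
-- def get_mission_level(mission_id: str) -> int:
--     """Determine mission difficulty level based on type"""
--     if any(keyword in mission_id.lower() for keyword in ['military', 'bunker', 'khimmash']):
--         return 5  # High tier
--     elif any(keyword in mission_id.lower() for keyword in ['airport', 'promzone', 'kamensk']):
--         return 4  # High-medium tier
--     elif any(keyword in mission_id.lower() for keyword in ['ind_', 'industrial']):
--         return 3  # Medium tier
--     elif any(keyword in mission_id.lower() for keyword in ['sawmill', 'lighthouse', 'elevator']):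
--         return 2  # Low-medium tier
--     else:
--         return 1  # Low tier
-- ===== SOURCE B (Python) =====
-- KEYWORD_LEVELS = {
--     'military': 5, 'bunker': 5, 'khimmash': 5,
--     'airport': 4, 'promzone': 4, 'kamensk': 4,
--     'ind_': 3, 'industrial': 3,
--     'sawmill': 2, 'lighthouse': 2, 'elevator': 2,
-- }
--
-- def get_mission_level(mission_id: str) -> int:
--     # Order-free aggregation: since A's ladder tests groups in descending
--     # level order, its result equals the max level of any matching keyword.
--     mid = mission_id.lower()
--     return max((lvl for kw, lvl in KEYWORD_LEVELS.items() if kw in mid), default=1)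
-- ===== Notes on version B (the rewrite author's own statement) =====
-- stated objective: alternative
-- what changed: Replaced the ordered first-match if-elif ladder by an order-independent max-aggregation over a flat keyword->level map (correct because A tests groups in descending level order, so first match = maximum matching level), lowering the string once.
import Mathlib
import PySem

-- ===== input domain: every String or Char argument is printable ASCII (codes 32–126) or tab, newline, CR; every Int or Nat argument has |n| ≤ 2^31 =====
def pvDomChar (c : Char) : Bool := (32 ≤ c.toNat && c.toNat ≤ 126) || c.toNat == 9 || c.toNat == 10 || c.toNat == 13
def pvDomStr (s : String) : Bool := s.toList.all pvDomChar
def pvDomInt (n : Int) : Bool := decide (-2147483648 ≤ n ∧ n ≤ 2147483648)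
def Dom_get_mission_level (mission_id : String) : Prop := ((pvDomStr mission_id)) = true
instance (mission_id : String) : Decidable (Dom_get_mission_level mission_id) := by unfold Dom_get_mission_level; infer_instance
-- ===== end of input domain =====

-- B replaces A's ordered first-match if-elif ladder by an order-independent max over a flat keyword->level map (alternative, same cost); the string is lowered once.


-- ===== PORT A =====
-- literal transliteration: each branch recomputes mission_id.lower() and tests its keyword list
def get_mission_level (mission_id : String) : Int :=
  if ["military", "bunker", "khimmash"].any (fun k => PySem.Str.isIn k (PySem.Str.lower mission_id)) then 5
  else if ["airport", "promzone", "kamensk"].any (fun k => PySem.Str.isIn k (PySem.Str.lower mission_id)) then 4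
  else if ["ind_", "industrial"].any (fun k => PySem.Str.isIn k (PySem.Str.lower mission_id)) then 3
  else if ["sawmill", "lighthouse", "elevator"].any (fun k => PySem.Str.isIn k (PySem.Str.lower mission_id)) then 2
  else 1

-- ===== PORT B =====
-- flat keyword -> level map (dict in insertion order, as an association list)
def pvKeywordLevels : List (String × Int) :=
  [("military", 5), ("bunker", 5), ("khimmash", 5),
   ("airport", 4), ("promzone", 4), ("kamensk", 4),
   ("ind_", 3), ("industrial", 3),
   ("sawmill", 2), ("lighthouse", 2), ("elevator", 2)]

-- max(levels of matching keywords, default=1): Python's max scans the generated items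
-- left to right keeping the running maximum, starting from the default — ported as a fold
def get_mission_level_alt (mission_id : String) : Int :=
  pvKeywordLevels.foldl
    (fun acc p => if PySem.Str.isIn p.1 (PySem.Str.lower mission_id) then max acc p.2 else acc) 1

-- ===== PRECONDITION & SPEC =====
def Spec_get_mission_level (mission_id : String) (out : Int) : Prop := out = get_mission_level_alt mission_id
instance (mission_id : String) (out : Int) : Decidable (Spec_get_mission_level mission_id out) := by unfold Spec_get_mission_level; infer_instance

-- ===== CLAIM (what is proved, stated in full; the proofs are below) =====
def Claim_equal_get_mission_level : Prop := ∀ (mission_id : String), Dom_get_mission_level mission_id → Spec_get_mission_level mission_id (get_mission_level mission_id)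

-- ===== LEMMAS AND PROOFS =====
-- Core fact over the 11 abstract keyword-membership booleans: the descending-priority
-- ladder equals the running max (from default 1) over the levels of matched keywords.
theorem pv_ladder_eq_max (b1 b2 b3 b4 b5 b6 b7 b8 b9 b10 b11 : Bool) :
    (if b1 || (b2 || (b3 || false)) then (5 : Int)
     else if b4 || (b5 || (b6 || false)) then 4
     else if b7 || (b8 || false) then 3
     else if b9 || (b10 || (b11 || false)) then 2
     else 1) =
    [((5:Int), b1), (5, b2), (5, b3), (4, b4), (4, b5), (4, b6), (3, b7), (3, b8), (2, b9), (2, b10), (2, b11)].foldl (fun acc p => if p.2 then max acc p.1 else acc) 1 := by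
  revert b1 b2 b3 b4 b5 b6 b7 b8 b9 b10 b11
  decide

-- ===== VERDICT (by name: the statement is the Claim_ definition above) =====
set_option maxHeartbeats 4000000 in
theorem get_mission_level_spec : Claim_equal_get_mission_level := by
  intro s _
  show get_mission_level s = get_mission_level_alt s
  exact pv_ladder_eq_max
    (PySem.Str.isIn "military" (PySem.Str.lower s))
    (PySem.Str.isIn "bunker" (PySem.Str.lower s))
    (PySem.Str.isIn "khimmash" (PySem.Str.lower s))
    (PySem.Str.isIn "airport" (PySem.Str.lower s))
    (PySem.Str.isIn "promzone" (PySem.Str.lower s))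
    (PySem.Str.isIn "kamensk" (PySem.Str.lower s))
    (PySem.Str.isIn "ind_" (PySem.Str.lower s))
    (PySem.Str.isIn "industrial" (PySem.Str.lower s))
    (PySem.Str.isIn "sawmill" (PySem.Str.lower s))
    (PySem.Str.isIn "lighthouse" (PySem.Str.lower s))
    (PySem.Str.isIn "elevator" (PySem.Str.lower s))
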